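-- pv_equiv track=rewrite | github.com/lalatendu97/leetcode | 3809 Best Reachable Tower/3809best-reachable-tower.py | bestTower
-- ===== SOURCE A (Python) =====
-- from typing import List
--
-- def bestTower(towers: List[List[int]], center: List[int], radius: int) -> List[int]:
--     towers = sorted(towers, key=lambda x: x[0])
--     score = -1
--     res = None
--
--     for i in towers:
--         if abs(i[0] - center[0]) + abs(i[1] - center[1]) <= radius:
--             if i[2] > score or i[2] == score and i[0] == res[0] and i[1] < res[1]:
--                 score = i[2]
--                 res = i[:2]
--
--     return res if res else [-1, -1]
-- ===== SOURCE B (Python) =====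
-- def bestTower(towers, center, radius):
--     best = None
--     best_key = None
--     for t in towers:
--         if abs(t[0] - center[0]) + abs(t[1] - center[1]) <= radius:
--             key = (-t[2], t[0], t[1])
--             if best is None or key < best_key:
--                 best_key = key
--                 best = [t[0], t[1]]
--     return best if best is not None else [-1, -1]
-- ===== Notes on version B (the rewrite author's own statement) =====
-- stated objective: alternative
-- what changed: Replaced A's sort-by-x-then-scan with an order-dependent tie-break by a single unsorted linear pass keeping the minimum of the key (-quality, x, y), which directly encodes max quality, then min x, then min y.
-- intended difference: On inputs where some tower is within the radius but every in-range tower has quality <= -2 (except the degenerate corner where the best such tower itself sits at coordinates (-1,-1), where the two values coincide), A's score = -1 sentinel makes it ignore all of them and return [-1, -1], while B returns the coordinates of the best such tower, the intended value since the function's purpose is to pick the best reachable tower. — e.g. on bestTower([[0, 1, -2]], [0, 0], 5): A returns [-1, -1], B returns [0, 1]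
import Mathlib
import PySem

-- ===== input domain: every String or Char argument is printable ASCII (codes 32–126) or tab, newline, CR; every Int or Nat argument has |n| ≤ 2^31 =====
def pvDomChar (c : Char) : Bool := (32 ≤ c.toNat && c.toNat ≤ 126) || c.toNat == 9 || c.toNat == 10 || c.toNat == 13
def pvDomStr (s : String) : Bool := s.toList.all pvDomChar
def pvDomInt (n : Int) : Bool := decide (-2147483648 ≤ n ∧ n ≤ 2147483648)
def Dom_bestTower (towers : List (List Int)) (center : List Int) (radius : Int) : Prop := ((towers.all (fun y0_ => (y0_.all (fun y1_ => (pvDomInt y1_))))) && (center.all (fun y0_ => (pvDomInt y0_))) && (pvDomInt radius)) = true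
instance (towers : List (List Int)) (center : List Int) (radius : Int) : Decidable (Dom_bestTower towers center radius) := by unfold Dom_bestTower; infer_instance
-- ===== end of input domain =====

-- B replaces A's sort-by-x-then-scan by a single unsorted linear pass keeping the
-- minimum of the key (-quality, x, y), a direct keyed minimum with the same tie-break.

-- ===== PORT A =====
def bestTower (towers : List (List Int)) (center : List Int) (radius : Int) : List Int :=
  let ts := PySem.List.sorted towers (fun x => PySem.List.pyGetD x 0 0) false
  let st := ts.foldl (fun (st : Int × Option (List Int)) i =>
    if |PySem.List.pyGetD i 0 0 - PySem.List.pyGetD center 0 0| +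
       |PySem.List.pyGetD i 1 0 - PySem.List.pyGetD center 1 0| ≤ radius then
      if PySem.List.pyGetD i 2 0 > st.1 ∨
         (PySem.List.pyGetD i 2 0 = st.1 ∧
          PySem.List.pyGetD i 0 0 = PySem.List.pyGetD (st.2.getD []) 0 0 ∧
          PySem.List.pyGetD i 1 0 < PySem.List.pyGetD (st.2.getD []) 1 0) then
        (PySem.List.pyGetD i 2 0, some (PySem.List.slice i none (some 2)))
      else st
    else st) ((-1 : Int), (none : Option (List Int)))
  match st.2 with
  | some r => r
  | none => [-1, -1]

-- ===== PORT B =====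
-- Python tuple '<' on int triples, exactly lexicographic.
def keyLtB (a b : Int × Int × Int) : Bool :=
  a.1 < b.1 || (a.1 == b.1 && (a.2.1 < b.2.1 || (a.2.1 == b.2.1 && a.2.2 < b.2.2)))

def bestTower_alt (towers : List (List Int)) (center : List Int) (radius : Int) : List Int :=
  let best := towers.foldl (fun (b : Option ((Int × Int × Int) × List Int)) t =>
    if |PySem.List.pyGetD t 0 0 - PySem.List.pyGetD center 0 0| +
       |PySem.List.pyGetD t 1 0 - PySem.List.pyGetD center 1 0| ≤ radius then
      let key := (-(PySem.List.pyGetD t 2 0), PySem.List.pyGetD t 0 0, PySem.List.pyGetD t 1 0)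
      match b with
      | none => some (key, [PySem.List.pyGetD t 0 0, PySem.List.pyGetD t 1 0])
      | some (bk, _) =>
        if keyLtB key bk then some (key, [PySem.List.pyGetD t 0 0, PySem.List.pyGetD t 1 0]) else b
    else b) none
  match best with
  | some (_, v) => v
  | none => [-1, -1]

-- ===== PRECONDITION & SPEC =====
-- 'tower t is within Manhattan radius of center' (on well-shaped inputs getD is the real entry)
def pvInR (center : List Int) (radius : Int) (t : List Int) : Bool :=
  decide (|t.getD 0 0 - center.getD 0 0| + |t.getD 1 0 - center.getD 1 0| ≤ radius)

-- A's stable x-sorted scan order (the list Python's sorted(towers, key=λx: x[0]) yields)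
def pvSortedByX (towers : List (List Int)) : List (List Int) :=
  PySem.List.sorted towers (fun x => PySem.List.pyGetD x 0 0) false

-- 'A does not hit res[0] with res = None': every in-range quality -1 tower of the x-sorted
-- scan order is preceded in it by an in-range quality ≥ 0 tower
def pvNoCrash (center : List Int) (radius : Int) (ss : List (List Int)) : Prop :=
  ∀ i < ss.length, pvInR center radius (ss.getD i []) = true → (ss.getD i []).getD 2 0 = -1 →
    ∃ j < i, pvInR center radius (ss.getD j []) = true ∧ 0 ≤ (ss.getD j []).getD 2 0

-- Pre_ excludes exactly the inputs where A raises: towers or center too short for the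
-- indexing it performs (IndexError), and inputs where, scanning towers by increasing x,
-- an in-range quality -1 tower is met before any in-range quality ≥ 0 tower, on which
-- A's 'i[2] == score' comparison against its score = -1 sentinel hits 'res[0]' with
-- res = None (TypeError). On every input where A returns, Pre_ holds.
def Pre_bestTower (towers : List (List Int)) (center : List Int) (radius : Int) : Prop :=
  towers = [] ∨
    (2 ≤ center.length ∧
     (∀ t ∈ towers, 2 ≤ t.length ∧ (pvInR center radius t = true → 3 ≤ t.length)) ∧
     pvNoCrash center radius (pvSortedByX towers))
instance (towers : List (List Int)) (center : List Int) (radius : Int) : Decidable (Pre_bestTower towers center radius) := by unfold Pre_bestTower pvNoCrash; infer_instance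
def pvWitness_bestTower : List (List Int) × List Int × Int := ([[0, 0, 1]], [0, 0], 1)

-- B's comparison key packed into one integer (exact for |entries| ≤ 2^31, i.e. on Dom_):
-- higher quality first, then smaller x, then smaller y
def pvK (t : List Int) : Int :=
  ((2147483648 - t.getD 2 0) * 8589934592 + t.getD 0 0 + 2147483648) * 8589934592 +
    t.getD 1 0 + 2147483648

-- On inputs where the best in-range tower (max quality, then min x, then min y) exists and has
-- quality ≤ -2, A's score = -1 sentinel makes it ignore every in-range tower and return [-1, -1],
-- while B returns that best tower's coordinates — the intended value, since the function's purpose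
-- is to pick the best reachable tower (excluded is only the degenerate corner where that best
-- tower itself sits at (-1, -1): there the two values coincide).
def D_bestTower (towers : List (List Int)) (center : List Int) (radius : Int) : Prop :=
  ∃ t ∈ towers, pvInR center radius t ∧ t.getD 2 0 ≤ -2 ∧ t.take 2 ≠ [-1, -1] ∧
    ∀ u ∈ towers, pvInR center radius u → pvK t ≤ pvK u
instance (towers : List (List Int)) (center : List Int) (radius : Int) : Decidable (D_bestTower towers center radius) := by unfold D_bestTower; infer_instance

def Spec_bestTower (towers : List (List Int)) (center : List Int) (radius : Int) (out : List Int) : Prop := ¬ D_bestTower towers center radius → out = bestTower_alt towers center radius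
instance (towers : List (List Int)) (center : List Int) (radius : Int) (out : List Int) : Decidable (Spec_bestTower towers center radius out) := by unfold Spec_bestTower; infer_instance

def pvDiffWitness_bestTower : List (List Int) × List Int × Int := ([[0, 1, -2]], [0, 0], 5)
def pvDiffWitnessOut_bestTower : (List Int) × (List Int) := ([-1, -1], [0, 1])

-- ===== CLAIM (what is proved, stated in full; the proofs are below) =====
def Claim_unchanged_bestTower : Prop := ∀ (towers : List (List Int)) (center : List Int) (radius : Int), Dom_bestTower towers center radius → Pre_bestTower towers center radius → Spec_bestTower towers center radius (bestTower towers center radius)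
def Claim_exact_bestTower : Prop := ∀ (towers : List (List Int)) (center : List Int) (radius : Int), Dom_bestTower towers center radius → Pre_bestTower towers center radius → D_bestTower towers center radius → bestTower towers center radius ≠ bestTower_alt towers center radius
def Claim_changed_bestTower : Prop := Dom_bestTower (pvDiffWitness_bestTower.1) (pvDiffWitness_bestTower.2.1) (pvDiffWitness_bestTower.2.2) ∧ Pre_bestTower (pvDiffWitness_bestTower.1) (pvDiffWitness_bestTower.2.1) (pvDiffWitness_bestTower.2.2) ∧ D_bestTower (pvDiffWitness_bestTower.1) (pvDiffWitness_bestTower.2.1) (pvDiffWitness_bestTower.2.2) ∧ bestTower (pvDiffWitness_bestTower.1) (pvDiffWitness_bestTower.2.1) (pvDiffWitness_bestTower.2.2) = pvDiffWitnessOut_bestTower.1 ∧ bestTower_alt (pvDiffWitness_bestTower.1) (pvDiffWitness_bestTower.2.1) (pvDiffWitness_bestTower.2.2) = pvDiffWitnessOut_bestTower.2 ∧ pvDiffWitnessOut_bestTower.1 ≠ pvDiffWitnessOut_bestTower.2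


-- ===== LEMMAS AND PROOFS =====

-- bridge: Python-style indexing with small nonnegative numerals is List.getD
theorem pv_pg0 (t : List Int) : PySem.List.pyGetD t 0 0 = t.getD 0 0 := by
  simp [PySem.List.pyGetD_ofNat', List.getD]
theorem pv_pg1 (t : List Int) : PySem.List.pyGetD t 1 0 = t.getD 1 0 := by
  simp [PySem.List.pyGetD_ofNat', List.getD]
theorem pv_pg2 (t : List Int) : PySem.List.pyGetD t 2 0 = t.getD 2 0 := by
  simp [PySem.List.pyGetD_ofNat', List.getD]

-- t[:2] on a list of length ≥ 3 is its first two entries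
theorem pv_slice2 (t : List Int) (h : 3 ≤ t.length) :
    PySem.List.slice t none (some 2) = [t.getD 0 0, t.getD 1 0] := by
  rcases t with _ | ⟨a, _ | ⟨b, r⟩⟩
  · simp at h
  · simp at h
  · have := PySem.List.slice_to (xs := a :: b :: r) (b := (2:Int)) (by omega)
    simp [this]

-- coordinate/quality accessors and the B-side key
def pvX (t : List Int) : Int := t.getD 0 0
def pvY (t : List Int) : Int := t.getD 1 0
def pvQ (t : List Int) : Int := t.getD 2 0
def pvKey (t : List Int) : Int × Int × Int := (-(pvQ t), pvX t, pvY t)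

theorem pv_keyLt_antisymm {a b : Int × Int × Int}
    (h1 : keyLtB a b = false) (h2 : keyLtB b a = false) : a = b := by
  obtain ⟨a1, a2, a3⟩ := a; obtain ⟨b1, b2, b3⟩ := b
  simp [keyLtB] at h1 h2
  simp only [Prod.mk.injEq]
  omega

-- the running minimum of B
def pvBmin (b : Option (Int × Int × Int)) (k : Int × Int × Int) : Option (Int × Int × Int) :=
  match b with
  | none => some k
  | some m => if keyLtB k m then some k else some m

-- a left fold of pvBmin starting from `some a` returns a minimum of a :: ks
theorem pv_min_spec : ∀ (ks : List (Int × Int × Int)) (a : Int × Int × Int),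
    ∃ m, List.foldl pvBmin (some a) ks = some m ∧ (m = a ∨ m ∈ ks) ∧
      (∀ k, (k = a ∨ k ∈ ks) → keyLtB k m = false) := by
  intro ks
  induction ks with
  | nil =>
    intro a
    refine ⟨a, rfl, Or.inl rfl, ?_⟩
    rintro k (rfl | hk)
    · obtain ⟨a1, a2, a3⟩ := k; simp [keyLtB]
    · simp at hk
  | cons k ks ih =>
    intro a
    by_cases hlt : keyLtB k a = true
    · obtain ⟨m, hm, hmem, hlb⟩ := ih k
      refine ⟨m, by simpa [pvBmin, hlt] using hm, ?_, ?_⟩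
      · rcases hmem with rfl | h
        · exact Or.inr (List.mem_cons_self ..)
        · exact Or.inr (List.mem_cons_of_mem _ h)
      · rintro k' (rfl | hk')
        · -- k' = a; k < a and ¬ (k < m) gives ¬ (a < m)
          have h1 := hlb k (Or.inl rfl)
          obtain ⟨k1,k2,k3⟩ := k; obtain ⟨a1,a2,a3⟩ := k'; obtain ⟨m1,m2,m3⟩ := m
          simp [keyLtB] at hlt h1 ⊢; omega
        · rcases List.mem_cons.mp hk' with rfl | h
          · exact hlb k' (Or.inl rfl)
          · exact hlb k' (Or.inr h)
    · have hlt' : keyLtB k a = false := by simpa using hlt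
      obtain ⟨m, hm, hmem, hlb⟩ := ih a
      refine ⟨m, by simpa [pvBmin, hlt'] using hm, ?_, ?_⟩
      · rcases hmem with rfl | h
        · exact Or.inl rfl
        · exact Or.inr (List.mem_cons_of_mem _ h)
      · rintro k' (rfl | hk')
        · exact hlb k' (Or.inl rfl)
        · rcases List.mem_cons.mp hk' with rfl | h
          · -- k' = k; ¬ (k < a), ¬ (a < m) gives ¬ (k < m)
            have h1 := hlb a (Or.inl rfl)
            obtain ⟨k1,k2,k3⟩ := k'; obtain ⟨a1,a2,a3⟩ := a; obtain ⟨m1,m2,m3⟩ := m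
            simp [keyLtB] at hlt' h1 ⊢; omega
          · exact hlb k' (Or.inr h)

-- key lists: all in-range towers, and the in-range towers A's sentinel admits (quality ≥ 0)
def pvKeysAll (center : List Int) (radius : Int) (l : List (List Int)) : List (Int × Int × Int) :=
  (l.filter (pvInR center radius)).map pvKey
def pvKeysV (center : List Int) (radius : Int) (l : List (List Int)) : List (Int × Int × Int) :=
  (l.filter (fun t => pvInR center radius t && decide (0 ≤ pvQ t))).map pvKey

-- the fold steps of the two ports, by name (definitionally the ports' lambdas)
def pvAstep (center : List Int) (radius : Int) (st : Int × Option (List Int)) (i : List Int) :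
    Int × Option (List Int) :=
  if |PySem.List.pyGetD i 0 0 - PySem.List.pyGetD center 0 0| +
     |PySem.List.pyGetD i 1 0 - PySem.List.pyGetD center 1 0| ≤ radius then
    if PySem.List.pyGetD i 2 0 > st.1 ∨
       (PySem.List.pyGetD i 2 0 = st.1 ∧
        PySem.List.pyGetD i 0 0 = PySem.List.pyGetD (st.2.getD []) 0 0 ∧
        PySem.List.pyGetD i 1 0 < PySem.List.pyGetD (st.2.getD []) 1 0) then
      (PySem.List.pyGetD i 2 0, some (PySem.List.slice i none (some 2)))
    else st
  else st

def pvBstep (center : List Int) (radius : Int)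
    (b : Option ((Int × Int × Int) × List Int)) (t : List Int) :
    Option ((Int × Int × Int) × List Int) :=
  if |PySem.List.pyGetD t 0 0 - PySem.List.pyGetD center 0 0| +
     |PySem.List.pyGetD t 1 0 - PySem.List.pyGetD center 1 0| ≤ radius then
    let key := (-(PySem.List.pyGetD t 2 0), PySem.List.pyGetD t 0 0, PySem.List.pyGetD t 1 0)
    match b with
    | none => some (key, [PySem.List.pyGetD t 0 0, PySem.List.pyGetD t 1 0])
    | some (bk, _) =>
      if keyLtB key bk then some (key, [PySem.List.pyGetD t 0 0, PySem.List.pyGetD t 1 0]) else b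
  else b

def pvPair (k : Int × Int × Int) : (Int × Int × Int) × List Int := (k, [k.2.1, k.2.2])

theorem pv_inR_le (center : List Int) (radius : Int) (t : List Int)
    (h : pvInR center radius t = true) :
    |PySem.List.pyGetD t 0 0 - PySem.List.pyGetD center 0 0| +
      |PySem.List.pyGetD t 1 0 - PySem.List.pyGetD center 1 0| ≤ radius := by
  rw [pv_pg0, pv_pg1, pv_pg0 center, pv_pg1 center]
  simpa [pvInR] using h

theorem pv_inR_not_le (center : List Int) (radius : Int) (t : List Int)
    (h : ¬ pvInR center radius t = true) :
    ¬ (|PySem.List.pyGetD t 0 0 - PySem.List.pyGetD center 0 0| +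
      |PySem.List.pyGetD t 1 0 - PySem.List.pyGetD center 1 0| ≤ radius) := by
  rw [pv_pg0, pv_pg1, pv_pg0 center, pv_pg1 center]
  simpa [pvInR] using h

-- B's fold is the running key minimum, carrying the coordinates of the current key
theorem pv_B_inv (center : List Int) (radius : Int) : ∀ (l : List (List Int)) (ob : Option (Int × Int × Int)),
    List.foldl (pvBstep center radius) (Option.map pvPair ob) l
      = Option.map pvPair (List.foldl pvBmin ob (pvKeysAll center radius l)) := by
  intro l
  induction l with
  | nil => intro ob; rfl
  | cons t l ih =>
    intro ob
    have e0 : PySem.List.pyGetD t 0 0 = pvX t := pv_pg0 t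
    have e1 : PySem.List.pyGetD t 1 0 = pvY t := pv_pg1 t
    have e2 : PySem.List.pyGetD t 2 0 = pvQ t := pv_pg2 t
    by_cases hin : pvInR center radius t = true
    · have hR := pv_inR_le center radius t hin
      have hkeys : pvKeysAll center radius (t :: l) = pvKey t :: pvKeysAll center radius l := by
        simp [pvKeysAll, hin]
      rw [hkeys]
      cases ob with
      | none =>
        have hstep : pvBstep center radius (Option.map pvPair none) t
            = Option.map pvPair (some (pvKey t)) := by
          simp only [Option.map_none, Option.map_some, pvBstep]
          rw [if_pos hR]
          simp only [e0, e1, e2]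
          rfl
        rw [List.foldl_cons, hstep]
        exact ih (some (pvKey t))
      | some m =>
        have hstep : pvBstep center radius (Option.map pvPair (some m)) t
            = Option.map pvPair (pvBmin (some m) (pvKey t)) := by
          simp only [Option.map_some, pvBstep, pvPair]
          rw [if_pos hR]
          simp only [e0, e1, e2]
          by_cases hk : keyLtB (pvKey t) m = true
          · simp only [pvKey] at hk
            simp [pvBmin, pvKey, hk, pvPair]
          · simp only [Bool.not_eq_true] at hk
            have hk' : keyLtB (-pvQ t, pvX t, pvY t) m = false := hk
            simp [pvBmin, pvKey, hk', pvPair]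
        rw [List.foldl_cons, hstep]
        exact ih (pvBmin (some m) (pvKey t))
    · have hR := pv_inR_not_le center radius t hin
      have hkeys : pvKeysAll center radius (t :: l) = pvKeysAll center radius l := by
        simp [pvKeysAll, hin]
      have hstep : pvBstep center radius (Option.map pvPair ob) t = Option.map pvPair ob := by
        simp only [pvBstep]
        rw [if_neg hR]
      rw [hkeys, List.foldl_cons, hstep, ih ob]

-- the scan-order safety condition as a Boolean recursion the invariant can consume:
-- the first in-range quality ≥ -1 tower of the list (if any) has quality ≥ 0
def pvSafeB (center : List Int) (radius : Int) : List (List Int) → Bool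
  | [] => true
  | t :: r => if pvInR center radius t && decide (-1 ≤ t.getD 2 0) then decide (0 ≤ t.getD 2 0)
              else pvSafeB center radius r

-- Pre_'s indexed no-crash condition gives pvSafeB on the same list
theorem pv_noCrash_safe (center : List Int) (radius : Int) : ∀ (ss : List (List Int)),
    pvNoCrash center radius ss → pvSafeB center radius ss = true := by
  intro ss
  induction ss with
  | nil => intro _; rfl
  | cons t r ih =>
    intro h
    by_cases hc : (pvInR center radius t && decide (-1 ≤ t.getD 2 0)) = true
    · simp only [pvSafeB, if_pos hc]
      simp only [Bool.and_eq_true, decide_eq_true_eq] at hc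
      by_cases hq : t.getD 2 0 = -1
      · obtain ⟨j, hj, -⟩ := h 0 (by simp) (by simpa using hc.1) (by simpa using hq)
        omega
      · simp only [decide_eq_true_eq]
        omega
    · simp only [pvSafeB, if_neg hc]
      apply ih
      intro i hi hin hq
      obtain ⟨j, hj, hinj, hqj⟩ := h (i + 1) (by simpa using Nat.succ_lt_succ hi)
        (by simpa using hin) (by simpa using hq)
      cases j with
      | zero =>
        exfalso
        simp only [List.getD_cons_zero] at hinj hqj
        simp only [Bool.and_eq_true, decide_eq_true_eq, not_and] at hc
        have := hc hinj
        omega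
      | succ j' =>
        exact ⟨j', by omega, by simpa using hinj, by simpa using hqj⟩

-- when every in-range tower of the list has quality ≤ -2, pvSafeB holds trivially
theorem pv_neg_safe (center : List Int) (radius : Int) : ∀ (ss : List (List Int)),
    (∀ t ∈ ss, pvInR center radius t = true → t.getD 2 0 ≤ -2) →
    pvSafeB center radius ss = true := by
  intro ss
  induction ss with
  | nil => intro _; rfl
  | cons t r ih =>
    intro h
    have hc : (pvInR center radius t && decide (-1 ≤ t.getD 2 0)) = false := by
      by_cases hin : pvInR center radius t = true
      · have h2 := h t (List.mem_cons_self ..) hin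
        simp only [hin, Bool.true_and, decide_eq_false_iff_not]
        omega
      · simp only [Bool.not_eq_true] at hin
        simp [hin]
    simp only [pvSafeB, hc, Bool.false_eq_true, if_false]
    exact ih (fun u hu => h u (List.mem_cons_of_mem _ hu))

-- under the no-crash condition, if no in-range tower has quality ≥ 0 then none has quality -1
theorem pv_no_q_neg1 (towers : List (List Int)) (center : List Int) (radius : Int)
    (hnc : pvNoCrash center radius (pvSortedByX towers))
    (hex0 : ¬ ∃ t ∈ towers, pvInR center radius t = true ∧ 0 ≤ t.getD 2 0) :
    ∀ t ∈ towers, pvInR center radius t = true → t.getD 2 0 ≤ -2 := by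
  intro t ht hin
  by_contra hq
  push_neg at hq
  have hq0 : ¬ 0 ≤ t.getD 2 0 := fun h => hex0 ⟨t, ht, hin, h⟩
  have hq1 : t.getD 2 0 = -1 := by omega
  have htm : t ∈ pvSortedByX towers := by
    unfold pvSortedByX
    exact (PySem.List.mem_sorted _ _ _ _).mpr ht
  obtain ⟨i, hi, hget⟩ := List.getElem_of_mem htm
  have hgd : (pvSortedByX towers).getD i [] = t := by
    rw [List.getD_eq_getElem _ _ hi, hget]
  obtain ⟨j, hj, hinj, hqj⟩ := hnc i hi (by rw [hgd]; exact hin) (by rw [hgd]; exact hq1)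
  have hjm : (pvSortedByX towers).getD j [] ∈ towers := by
    rw [List.getD_eq_getElem _ _ (by omega : j < (pvSortedByX towers).length)]
    have : (pvSortedByX towers)[j] ∈ pvSortedByX towers := List.getElem_mem _
    unfold pvSortedByX at this
    exact (PySem.List.mem_sorted _ _ _ _).mp this
  exact hex0 ⟨_, hjm, hinj, hqj⟩

-- the invariant tying A's fold state to the running minimum over admitted keys
def pvAinv (ob : Option (Int × Int × Int)) (st : Int × Option (List Int)) : Prop :=
  match ob with
  | none => st = (-1, none)
  | some m => st = (-m.1, some [m.2.1, m.2.2]) ∧ 0 ≤ -m.1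

theorem pv_A_inv (center : List Int) (radius : Int) : ∀ (s : List (List Int))
    (ob : Option (Int × Int × Int)) (st : Int × Option (List Int)),
    s.Pairwise (fun a b => pvX a ≤ pvX b) →
    (∀ t ∈ s, pvInR center radius t = true → 3 ≤ t.length) →
    pvAinv ob st →
    (∀ m, ob = some m → ∀ t ∈ s, m.2.1 ≤ pvX t) →
    (ob = none → pvSafeB center radius s = true) →
    pvAinv (List.foldl pvBmin ob (pvKeysV center radius s))
      (List.foldl (pvAstep center radius) st s) := by
  intro s
  induction s with
  | nil => intro ob st _ _ hst _ _; exact hst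
  | cons t s ih =>
    intro ob st hsort he hst hx hsafe
    have hsort' := (List.pairwise_cons.mp hsort).2
    have hhead := (List.pairwise_cons.mp hsort).1
    have he' : ∀ u ∈ s, pvInR center radius u = true → 3 ≤ u.length :=
      fun u hu => he u (List.mem_cons_of_mem _ hu)
    have e0 : PySem.List.pyGetD t 0 0 = pvX t := pv_pg0 t
    have e1 : PySem.List.pyGetD t 1 0 = pvY t := pv_pg1 t
    have e2 : PySem.List.pyGetD t 2 0 = pvQ t := pv_pg2 t
    by_cases hin : pvInR center radius t = true
    · have hR := pv_inR_le center radius t hin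
      have hlen : 3 ≤ t.length := he t (List.mem_cons_self ..) hin
      by_cases hq : 0 ≤ pvQ t
      · -- admitted tower
        have hkeys : pvKeysV center radius (t :: s) = pvKey t :: pvKeysV center radius s := by
          simp [pvKeysV, hin, hq]
        rw [hkeys]
        have hxnext : ∀ m', some (pvKey t) = some m' → ∀ u ∈ s, m'.2.1 ≤ pvX u := by
          intro m' hm' u hu
          obtain rfl : pvKey t = m' := Option.some.inj hm'
          exact hhead u hu
        have hinvK : pvAinv (some (pvKey t)) (pvQ t, some [pvX t, pvY t]) :=
          ⟨by simp [pvKey], by simp [pvKey]; omega⟩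
        have hsafeK : (some (pvKey t) : Option (Int × Int × Int)) = none →
            pvSafeB center radius s = true := fun h => absurd h (by simp)
        cases ob with
        | none =>
          have hst0 : st = (-1, none) := hst
          have hstep : pvAstep center radius st t = (pvQ t, some [pvX t, pvY t]) := by
            rw [hst0]
            simp only [pvAstep]
            rw [if_pos hR, if_pos (Or.inl (by rw [e2]; omega)), e2, pv_slice2 t hlen]
            rfl
          rw [List.foldl_cons, List.foldl_cons, hstep]
          exact ih (some (pvKey t)) _ hsort' he' hinvK hxnext hsafeK
        | some m =>
          obtain ⟨hst', hm1⟩ := hst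
          have hxm : m.2.1 ≤ pvX t := hx m rfl t (List.mem_cons_self ..)
          have hxkeep : ∀ m', some m = some m' → ∀ u ∈ s, m'.2.1 ≤ pvX u := by
            intro m' hm' u hu
            obtain rfl : m = m' := Option.some.inj hm'
            exact le_trans hxm (hhead u hu)
          have hsafeM : (some m : Option (Int × Int × Int)) = none →
              pvSafeB center radius s = true := fun h => absurd h (by simp)
          have eres0 : PySem.List.pyGetD [m.2.1, m.2.2] 0 0 = m.2.1 := by rw [pv_pg0]; rfl
          have eres1 : PySem.List.pyGetD [m.2.1, m.2.2] 1 0 = m.2.2 := by rw [pv_pg1]; rfl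
          by_cases hgt : pvQ t > -m.1
          · have hstep : pvAstep center radius st t = (pvQ t, some [pvX t, pvY t]) := by
              rw [hst']
              simp only [pvAstep]
              rw [if_pos hR, if_pos (Or.inl (by rw [e2]; exact hgt)), e2, pv_slice2 t hlen]
              rfl
            have hb : pvBmin (some m) (pvKey t) = some (pvKey t) := by
              have : keyLtB (pvKey t) m = true := by
                obtain ⟨m1,m2,m3⟩ := m
                simp only [pvKey, keyLtB] at *
                simp at *
                omega
              simp [pvBmin, this]
            rw [List.foldl_cons, List.foldl_cons, hstep, hb]
            exact ih (some (pvKey t)) _ hsort' he' hinvK hxnext hsafeK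
          · by_cases heq : pvQ t = -m.1
            · by_cases hxy : pvX t = m.2.1 ∧ pvY t < m.2.2
              · -- A replaces; the new key is strictly smaller
                have hstep : pvAstep center radius st t = (pvQ t, some [pvX t, pvY t]) := by
                  rw [hst']
                  simp only [pvAstep, Option.getD_some]
                  rw [if_pos hR,
                      if_pos (Or.inr ⟨by rw [e2]; exact heq,
                        by rw [e0, eres0]; exact hxy.1, by rw [e1, eres1]; exact hxy.2⟩),
                      e2, pv_slice2 t hlen]
                  rfl
                have hb : pvBmin (some m) (pvKey t) = some (pvKey t) := by
                  have : keyLtB (pvKey t) m = true := by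
                    obtain ⟨m1,m2,m3⟩ := m
                    obtain ⟨hx1, hy1⟩ := hxy
                    simp only [pvKey, keyLtB] at *
                    simp at *
                    omega
                  simp [pvBmin, this]
                rw [List.foldl_cons, List.foldl_cons, hstep, hb]
                exact ih (some (pvKey t)) _ hsort' he' hinvK hxnext hsafeK
              · -- A keeps; the new key is not smaller
                have hstep : pvAstep center radius st t = st := by
                  rw [hst']
                  simp only [pvAstep, Option.getD_some]
                  rw [if_pos hR, if_neg]
                  rw [e0, e1, e2, eres0, eres1]
                  push_neg
                  exact ⟨by omega, fun _ h2 => not_lt.mp (fun h3 => hxy ⟨h2, h3⟩)⟩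
                have hb : pvBmin (some m) (pvKey t) = some m := by
                  have : keyLtB (pvKey t) m = false := by
                    obtain ⟨m1,m2,m3⟩ := m
                    simp only [pvKey, keyLtB] at *
                    simp at *
                    omega
                  simp [pvBmin, this]
                rw [List.foldl_cons, List.foldl_cons, hstep, hb]
                exact ih (some m) st hsort' he' ⟨hst', hm1⟩ hxkeep hsafeM
            · -- 0 ≤ pvQ t < -m.1: skipped by A, and its key is larger
              have hstep : pvAstep center radius st t = st := by
                rw [hst']
                simp only [pvAstep, Option.getD_some]
                rw [if_pos hR, if_neg]
                rw [e0, e1, e2, eres0, eres1]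
                push_neg
                exact ⟨by omega, fun h => (heq h).elim⟩
              have hb : pvBmin (some m) (pvKey t) = some m := by
                have : keyLtB (pvKey t) m = false := by
                  obtain ⟨m1,m2,m3⟩ := m
                  simp only [pvKey, keyLtB] at *
                  simp at *
                  omega
                simp [pvBmin, this]
              rw [List.foldl_cons, List.foldl_cons, hstep, hb]
              exact ih (some m) st hsort' he' ⟨hst', hm1⟩ hxkeep hsafeM
      · -- in range, quality < 0: not admitted by the sentinel
        have hkeys : pvKeysV center radius (t :: s) = pvKeysV center radius s := by
          simp [pvKeysV, hin, hq]
        by_cases hq1 : pvQ t = -1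
        · -- quality exactly -1: the safety hypothesis rules out ob = none
          cases ob with
          | none =>
            exfalso
            have hs := hsafe rfl
            have hq1'' : t[2]?.getD 0 = (-1 : Int) := by
              have hq1' : t.getD 2 0 = -1 := hq1
              simpa [List.getD_eq_getElem?_getD] using hq1'
            simp [pvSafeB, hin, hq1''] at hs
          | some m =>
            obtain ⟨hst', hm1⟩ := hst
            have hq1' : pvQ t = -1 := hq1
            have hstep : pvAstep center radius st t = st := by
              rw [hst']
              simp only [pvAstep, Option.getD_some]
              rw [if_pos hR, if_neg]
              rw [e2]
              push_neg
              exact ⟨by omega, fun h => absurd h (by omega)⟩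
            rw [hkeys, List.foldl_cons, hstep]
            refine ih (some m) st hsort' he' ⟨hst', hm1⟩ ?_ (fun h => absurd h (by simp))
            intro m' hm' u hu
            obtain rfl : m = m' := Option.some.inj hm'
            exact le_trans (hx m rfl t (List.mem_cons_self ..)) (hhead u hu)
        · -- quality ≤ -2: skipped by A whatever the state
          have hq2 : pvQ t ≤ -2 := by omega
          have hst1 : st.1 = -1 ∨ 0 ≤ st.1 := by
            cases ob with
            | none => have hst0 : st = (-1, none) := hst; rw [hst0]; left; rfl
            | some m =>
              obtain ⟨hst', hm1⟩ := hst
              rw [hst']; right; simpa using hm1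
          have hstep : pvAstep center radius st t = st := by
            simp only [pvAstep]
            rw [if_pos hR, if_neg]
            rw [e2]
            push_neg
            exact ⟨by omega, fun h => by omega⟩
          have hsafe' : ob = none → pvSafeB center radius s = true := by
            intro h
            have hs := hsafe h
            have hq2' : t[2]?.getD 0 ≤ (-2 : Int) := by
              have h2 : t.getD 2 0 ≤ -2 := hq2
              simpa [List.getD_eq_getElem?_getD] using h2
            have hcf : ¬ (-1 ≤ t[2]?.getD 0) := by omega
            simpa [pvSafeB, hcf] using hs
          rw [hkeys, List.foldl_cons, hstep]
          exact ih ob st hsort' he' hst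
            (fun m hm u hu => hx m hm u (List.mem_cons_of_mem _ hu)) hsafe'
    · -- out of range: both skip
      have hR := pv_inR_not_le center radius t hin
      have hkeys : pvKeysV center radius (t :: s) = pvKeysV center radius s := by
        simp [pvKeysV, hin]
      have hstep : pvAstep center radius st t = st := by
        simp only [pvAstep]
        rw [if_neg hR]
      have hsafe' : ob = none → pvSafeB center radius s = true := by
        intro h
        have hs := hsafe h
        have hin' : pvInR center radius t = false := by simpa using hin
        simpa [pvSafeB, hin'] using hs
      rw [hkeys, List.foldl_cons, hstep]
      exact ih ob st hsort' he' hst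
        (fun m hm u hu => hx m hm u (List.mem_cons_of_mem _ hu)) hsafe'

theorem pv_A_unfold (towers : List (List Int)) (center : List Int) (radius : Int) :
    bestTower towers center radius =
      (match (List.foldl (pvAstep center radius) ((-1 : Int), (none : Option (List Int)))
          (PySem.List.sorted towers (fun x => PySem.List.pyGetD x 0 0) false)).2 with
       | some r => r
       | none => [-1, -1]) := rfl

theorem pv_B_unfold (towers : List (List Int)) (center : List Int) (radius : Int) :
    bestTower_alt towers center radius =
      (match List.foldl (pvBstep center radius) none towers with
       | some (_, v) => v
       | none => [-1, -1]) := rfl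

theorem pv_keysV_sub_all (center : List Int) (radius : Int) (towers : List (List Int))
    (k : Int × Int × Int)
    (hk : k ∈ pvKeysV center radius (PySem.List.sorted towers (fun x => PySem.List.pyGetD x 0 0) false)) :
    k ∈ pvKeysAll center radius towers := by
  obtain ⟨u, hu, rfl⟩ := List.mem_map.mp hk
  obtain ⟨hus, hcond⟩ := List.mem_filter.mp hu
  have hin : pvInR center radius u = true := by
    simp only [Bool.and_eq_true] at hcond
    exact hcond.1
  exact List.mem_map.mpr ⟨u, List.mem_filter.mpr
    ⟨(PySem.List.mem_sorted _ _ _ _).mp hus, hin⟩, rfl⟩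

theorem pv_keysAll_mem (center : List Int) (radius : Int) (towers : List (List Int))
    (k : Int × Int × Int) (hk : k ∈ pvKeysAll center radius towers) :
    ∃ u ∈ towers, pvInR center radius u = true ∧ k = pvKey u := by
  obtain ⟨u, hu, rfl⟩ := List.mem_map.mp hk
  obtain ⟨hut, hinu⟩ := List.mem_filter.mp hu
  exact ⟨u, hut, hinu, rfl⟩

-- Dom_ bounds every entry (and getD's default 0) by 2^31
theorem pv_bnd {towers : List (List Int)} {center : List Int} {radius : Int}
    (h : Dom_bestTower towers center radius) {v : List Int} (hv : v ∈ towers) (i : Nat) :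
    -2147483648 ≤ v.getD i 0 ∧ v.getD i 0 ≤ 2147483648 := by
  unfold Dom_bestTower at h
  simp only [Bool.and_eq_true, List.all_eq_true, pvDomInt, decide_eq_true_eq] at h
  obtain ⟨⟨h1, -⟩, -⟩ := h
  by_cases hi : i < v.length
  · rw [List.getD_eq_getElem v 0 hi]
    exact h1 v hv v[i] (List.getElem_mem hi)
  · rw [List.getD_eq_default v 0 (by omega)]
    omega

-- bridge: on Dom_-bounded towers, pvK t ≤ pvK u is exactly 'u's key is not below t's'
theorem pv_k_key (t u : List Int)
    (bt : ∀ i : Nat, -2147483648 ≤ t.getD i 0 ∧ t.getD i 0 ≤ 2147483648)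
    (bu : ∀ i : Nat, -2147483648 ≤ u.getD i 0 ∧ u.getD i 0 ≤ 2147483648) :
    pvK t ≤ pvK u ↔ keyLtB (pvKey u) (pvKey t) = false := by
  have b0 := bt 0; have b1 := bt 1; have b2 := bt 2
  have c0 := bu 0; have c1 := bu 1; have c2 := bu 2
  simp [pvK, keyLtB, pvKey, pvX, pvY, pvQ]
  simp only [List.getD_eq_getElem?_getD] at b0 b1 b2 c0 c1 c2
  omega

-- t[:2] as List.take, for the coordinate clause of D_
theorem pv_take2 (t : List Int) (h : 3 ≤ t.length) :
    t.take 2 = [t.getD 0 0, t.getD 1 0] := by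
  rcases t with _ | ⟨a, _ | ⟨b, r⟩⟩ <;> simp_all

-- when every in-range quality is ≤ -2, A's sentinel admits no key at all
theorem pv_keysV_nil (center : List Int) (radius : Int) (towers : List (List Int))
    (hneg : ∀ t ∈ towers, pvInR center radius t = true → t.getD 2 0 ≤ -2) :
    pvKeysV center radius (PySem.List.sorted towers (fun x => PySem.List.pyGetD x 0 0) false) = [] := by
  simp only [pvKeysV, List.map_eq_nil_iff, List.filter_eq_nil_iff]
  intro t ht
  simp only [Bool.and_eq_true, decide_eq_true_eq, not_and]
  intro hin h0
  have hq : pvQ t ≤ -2 := hneg t ((PySem.List.mem_sorted _ _ _ _).mp ht) hin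
  omega

-- under Pre_'s shape facts and all-negative in-range qualities, A returns its sentinel
theorem pv_A_neg (towers : List (List Int)) (center : List Int) (radius : Int)
    (hshape : ∀ t ∈ towers, pvInR center radius t = true → 3 ≤ t.length)
    (hneg : ∀ t ∈ towers, pvInR center radius t = true → t.getD 2 0 ≤ -2) :
    bestTower towers center radius = [-1, -1] := by
  have hsort : (PySem.List.sorted towers (fun x => PySem.List.pyGetD x 0 0) false).Pairwise
      (fun a b => pvX a ≤ pvX b) := by
    refine (PySem.List.sorted_pairwise (xs := towers)
      (key := fun x => PySem.List.pyGetD x 0 0)).imp ?_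
    intro a b h
    rwa [pv_pg0, pv_pg0] at h
  have he : ∀ t ∈ PySem.List.sorted towers (fun x => PySem.List.pyGetD x 0 0) false,
      pvInR center radius t = true → 3 ≤ t.length := by
    intro t ht hin
    exact hshape t ((PySem.List.mem_sorted _ _ _ _).mp ht) hin
  have hsafe : pvSafeB center radius
      (PySem.List.sorted towers (fun x => PySem.List.pyGetD x 0 0) false) = true := by
    apply pv_neg_safe
    intro t ht hin
    exact hneg t ((PySem.List.mem_sorted _ _ _ _).mp ht) hin
  have hA := pv_A_inv center radius
    (PySem.List.sorted towers (fun x => PySem.List.pyGetD x 0 0) false)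
    none ((-1 : Int), none) hsort he rfl (by intro m hm; cases hm) (fun _ => hsafe)
  rw [pv_keysV_nil center radius towers hneg] at hA
  have hst : (List.foldl (pvAstep center radius) ((-1 : Int), (none : Option (List Int)))
      (PySem.List.sorted towers (fun x => PySem.List.pyGetD x 0 0) false)) = (-1, none) := hA
  rw [pv_A_unfold, hst]

-- when some tower is in range, B returns the coordinates of a minimal key
theorem pv_B_min (towers : List (List Int)) (center : List Int) (radius : Int)
    (t0 : List Int) (ht0 : t0 ∈ towers) (hin0 : pvInR center radius t0 = true) :
    ∃ m, m ∈ pvKeysAll center radius towers ∧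
      (∀ k ∈ pvKeysAll center radius towers, keyLtB k m = false) ∧
      bestTower_alt towers center radius = [m.2.1, m.2.2] := by
  have hB := pv_B_inv center radius towers none
  simp only [Option.map_none] at hB
  have hmem : pvKey t0 ∈ pvKeysAll center radius towers :=
    List.mem_map.mpr ⟨t0, List.mem_filter.mpr ⟨ht0, hin0⟩, rfl⟩
  obtain ⟨kA, ksA, hcons⟩ := List.exists_cons_of_ne_nil (List.ne_nil_of_mem hmem)
  obtain ⟨m, hm, hmemm, hlb⟩ := pv_min_spec ksA kA
  refine ⟨m, ?_, ?_, ?_⟩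
  · rw [hcons]
    rcases hmemm with rfl | h
    · exact List.mem_cons_self ..
    · exact List.mem_cons_of_mem _ h
  · intro k hk
    rw [hcons] at hk
    rcases List.mem_cons.mp hk with rfl | h
    · exact hlb k (Or.inl rfl)
    · exact hlb k (Or.inr h)
  · rw [pv_B_unfold, hB, hcons,
      show List.foldl pvBmin none (kA :: ksA) = List.foldl pvBmin (some kA) ksA from rfl, hm]
    rfl

-- A minimum of the sentinel-admitted keys is a minimum of all in-range keys, provided that,
-- when some tower is in range, one in-range tower has quality ≥ 0.
theorem pv_MV_eq_MA (towers : List (List Int)) (center : List Int) (radius : Int)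
    (hq1 : (∃ t ∈ towers, pvInR center radius t = true) →
      ∃ t1 ∈ towers, pvInR center radius t1 = true ∧ 0 ≤ pvQ t1) :
    List.foldl pvBmin none
        (pvKeysV center radius (PySem.List.sorted towers (fun x => PySem.List.pyGetD x 0 0) false))
      = List.foldl pvBmin none (pvKeysAll center radius towers) := by
  by_cases hex : ∃ t ∈ towers, pvInR center radius t = true
  · -- some in-range tower; one of them has quality ≥ 0
    obtain ⟨t0, ht0, hin0⟩ := hex
    obtain ⟨t1, ht1, hin1, hq1⟩ := hq1 ⟨t0, ht0, hin0⟩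
    -- both key lists are nonempty
    have hmemV : pvKey t1 ∈ pvKeysV center radius
        (PySem.List.sorted towers (fun x => PySem.List.pyGetD x 0 0) false) := by
      refine List.mem_map.mpr ⟨t1, List.mem_filter.mpr ⟨?_, ?_⟩, rfl⟩
      · exact (PySem.List.mem_sorted _ _ _ _).mpr ht1
      · simp [hin1, hq1]
    have hmemA : pvKey t0 ∈ pvKeysAll center radius towers :=
      List.mem_map.mpr ⟨t0, List.mem_filter.mpr ⟨ht0, hin0⟩, rfl⟩
    obtain ⟨kV, ksV, hV⟩ := List.exists_cons_of_ne_nil (List.ne_nil_of_mem hmemV)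
    obtain ⟨kA, ksA, hA⟩ := List.exists_cons_of_ne_nil (List.ne_nil_of_mem hmemA)
    obtain ⟨m1, hm1, hm1mem, hm1lb⟩ := pv_min_spec ksV kV
    obtain ⟨m2, hm2, hm2mem, hm2lb⟩ := pv_min_spec ksA kA
    have hm1mem' : m1 ∈ pvKeysV center radius
        (PySem.List.sorted towers (fun x => PySem.List.pyGetD x 0 0) false) := by
      rw [hV]
      rcases hm1mem with rfl | h
      · exact List.mem_cons_self ..
      · exact List.mem_cons_of_mem _ h
    have hm2mem' : m2 ∈ pvKeysAll center radius towers := by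
      rw [hA]
      rcases hm2mem with rfl | h
      · exact List.mem_cons_self ..
      · exact List.mem_cons_of_mem _ h
    have hm2lb' : ∀ k ∈ pvKeysAll center radius towers, keyLtB k m2 = false := by
      intro k hk
      rw [hA] at hk
      rcases List.mem_cons.mp hk with rfl | h
      · exact hm2lb k (Or.inl rfl)
      · exact hm2lb k (Or.inr h)
    have hm1lb' : ∀ k ∈ pvKeysV center radius
        (PySem.List.sorted towers (fun x => PySem.List.pyGetD x 0 0) false),
        keyLtB k m1 = false := by
      intro k hk
      rw [hV] at hk
      rcases List.mem_cons.mp hk with rfl | h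
      · exact hm1lb k (Or.inl rfl)
      · exact hm1lb k (Or.inr h)
    -- m1 is a lower bound of ALL in-range keys
    have hm1lbA : ∀ k ∈ pvKeysAll center radius towers, keyLtB k m1 = false := by
      intro k hk
      obtain ⟨u, hut, hinu, rfl⟩ := pv_keysAll_mem center radius towers k hk
      by_cases hqu : 0 ≤ pvQ u
      · refine hm1lb' (pvKey u) (List.mem_map.mpr ⟨u, List.mem_filter.mpr ⟨?_, ?_⟩, rfl⟩)
        · exact (PySem.List.mem_sorted _ _ _ _).mpr hut
        · simp [hinu, hqu]
      · -- quality < 0: its key is above every admitted key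
        obtain ⟨v, hv, rfl⟩ := List.mem_map.mp hm1mem'
        have hqv : 0 ≤ pvQ v := by
          have h := (List.mem_filter.mp hv).2
          simp only [Bool.and_eq_true, decide_eq_true_eq] at h
          exact h.2
        simp only [pvKey, keyLtB]
        simp
        omega
    have h12 : keyLtB m1 m2 = false := hm2lb' m1 (pv_keysV_sub_all center radius towers m1 hm1mem')
    have h21 : keyLtB m2 m1 = false := hm1lbA m2 hm2mem'
    have : m1 = m2 := pv_keyLt_antisymm h12 h21
    rw [hV, hA]
    show List.foldl pvBmin (pvBmin none kV) ksV = List.foldl pvBmin (pvBmin none kA) ksA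
    rw [show pvBmin none kV = some kV from rfl, show pvBmin none kA = some kA from rfl,
       hm1, hm2, this]
  · -- no tower in range: both key lists are empty
    push_neg at hex
    have h1 : pvKeysAll center radius towers = [] := by
      simp only [pvKeysAll, List.map_eq_nil_iff, List.filter_eq_nil_iff]
      intro t ht
      simp [hex t ht]
    have h2 : pvKeysV center radius
        (PySem.List.sorted towers (fun x => PySem.List.pyGetD x 0 0) false) = [] := by
      simp only [pvKeysV, List.map_eq_nil_iff, List.filter_eq_nil_iff]
      intro t ht
      have h := hex t ((PySem.List.mem_sorted _ _ _ _).mp ht)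
      simp only [ne_eq, Bool.not_eq_true] at h
      simp [h]
    rw [h1, h2]

-- A = B whenever the admitted minimum and the full minimum coincide
theorem pv_out_eq (towers : List (List Int)) (center : List Int) (radius : Int)
    (hshape : ∀ t ∈ towers, pvInR center radius t = true → 3 ≤ t.length)
    (hq1 : (∃ t ∈ towers, pvInR center radius t = true) →
      ∃ t1 ∈ towers, pvInR center radius t1 = true ∧ 0 ≤ pvQ t1)
    (hsafe : pvSafeB center radius
      (PySem.List.sorted towers (fun x => PySem.List.pyGetD x 0 0) false) = true) :
    bestTower towers center radius = bestTower_alt towers center radius := by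
  have hsort : (PySem.List.sorted towers (fun x => PySem.List.pyGetD x 0 0) false).Pairwise
      (fun a b => pvX a ≤ pvX b) := by
    refine (PySem.List.sorted_pairwise (xs := towers)
      (key := fun x => PySem.List.pyGetD x 0 0)).imp ?_
    intro a b h
    rwa [pv_pg0, pv_pg0] at h
  have he : ∀ t ∈ PySem.List.sorted towers (fun x => PySem.List.pyGetD x 0 0) false,
      pvInR center radius t = true → 3 ≤ t.length := by
    intro t ht hin
    exact hshape t ((PySem.List.mem_sorted _ _ _ _).mp ht) hin
  have hA := pv_A_inv center radius
    (PySem.List.sorted towers (fun x => PySem.List.pyGetD x 0 0) false)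
    none ((-1 : Int), none) hsort he rfl (by intro m hm; cases hm) (fun _ => hsafe)
  have hB := pv_B_inv center radius towers none
  have hMV := pv_MV_eq_MA towers center radius hq1
  simp only [Option.map_none] at hB
  rw [hMV] at hA
  rw [pv_A_unfold, pv_B_unfold, hB]
  cases hMA : List.foldl pvBmin none (pvKeysAll center radius towers) with
  | none =>
    rw [hMA] at hA
    have : (List.foldl (pvAstep center radius) ((-1 : Int), (none : Option (List Int)))
        (PySem.List.sorted towers (fun x => PySem.List.pyGetD x 0 0) false)) = (-1, none) := hA
    rw [this]
    rfl
  | some m =>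
    rw [hMA] at hA
    obtain ⟨hst, _⟩ := hA
    rw [hst]
    rfl

-- ===== VERDICT (by name: the statement is the Claim_ definition above) =====
theorem bestTower_spec : Claim_unchanged_bestTower := by
  intro towers center radius hdom hpre hnd
  rcases hpre with rfl | ⟨_hc, hshape, hnc⟩
  · rfl
  · have hshape' : ∀ t ∈ towers, pvInR center radius t = true → 3 ≤ t.length :=
      fun t ht hin => (hshape t ht).2 hin
    have hsafe : pvSafeB center radius
        (PySem.List.sorted towers (fun x => PySem.List.pyGetD x 0 0) false) = true :=
      pv_noCrash_safe center radius _ hnc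
    by_cases hex0 : ∃ t ∈ towers, pvInR center radius t = true ∧ 0 ≤ t.getD 2 0
    · exact pv_out_eq towers center radius hshape' (fun _ => hex0) hsafe
    · have hneg : ∀ t ∈ towers, pvInR center radius t = true → t.getD 2 0 ≤ -2 :=
        pv_no_q_neg1 towers center radius hnc hex0
      by_cases hex : ∃ t ∈ towers, pvInR center radius t = true
      · -- all in-range qualities ≤ -2; by ¬ D_ the best in-range tower sits at (-1,-1),
        -- so both sides return [-1,-1]
        obtain ⟨t0, ht0, hin0⟩ := hex
        obtain ⟨m, hmem, hlb, hBout⟩ := pv_B_min towers center radius t0 ht0 hin0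
        rw [pv_A_neg towers center radius hshape' hneg, hBout]
        obtain ⟨u, hu, hinu, rfl⟩ := pv_keysAll_mem center radius towers m hmem
        have humin : ∀ v ∈ towers, pvInR center radius v = true → pvK u ≤ pvK v := by
          intro v hv hinv
          exact (pv_k_key u v (pv_bnd hdom hu) (pv_bnd hdom hv)).mpr
            (hlb (pvKey v) (List.mem_map.mpr ⟨v, List.mem_filter.mpr ⟨hv, hinv⟩, rfl⟩))
        have hlen : 3 ≤ u.length := hshape' u hu hinu
        have hcoord : u.getD 0 0 = -1 ∧ u.getD 1 0 = -1 := by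
          by_contra hc
          refine hnd ⟨u, hu, hinu, hneg u hu hinu, ?_, humin⟩
          rw [pv_take2 u hlen]
          intro heq
          apply hc
          simpa using heq
        obtain ⟨h1, h2⟩ := hcoord
        simp [pvKey, pvX, pvY]
        simp only [List.getD_eq_getElem?_getD] at h1 h2
        omega
      · exact pv_out_eq towers center radius hshape' (fun hex' => absurd hex' hex) hsafe

theorem bestTower_changed : Claim_changed_bestTower := by unfold Claim_changed_bestTower; decide

theorem bestTower_tight : Claim_exact_bestTower := by
  intro towers center radius hdom hpre hd
  obtain ⟨t, ht, hint, hq2, hcoordT, hmin⟩ := hd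
  rcases hpre with rfl | ⟨_hc, hshape, _hnc⟩
  · simp at ht
  · have hshape' : ∀ u ∈ towers, pvInR center radius u = true → 3 ≤ u.length :=
      fun u hu hin => (hshape u hu).2 hin
    have hneg : ∀ u ∈ towers, pvInR center radius u = true → u.getD 2 0 ≤ -2 := by
      intro v hv hinv
      have h := (pv_k_key t v (pv_bnd hdom ht) (pv_bnd hdom hv)).mp (hmin v hv hinv)
      simp [keyLtB, pvKey, pvX, pvY, pvQ] at h
      simp only [List.getD_eq_getElem?_getD] at hq2 ⊢
      omega
    obtain ⟨m, hmem, hlb, hBout⟩ := pv_B_min towers center radius t ht hint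
    rw [pv_A_neg towers center radius hshape' hneg, hBout]
    intro hEq
    obtain ⟨u, hu, hinu, rfl⟩ := pv_keysAll_mem center radius towers m hmem
    have h1 : keyLtB (pvKey u) (pvKey t) = false :=
      (pv_k_key t u (pv_bnd hdom ht) (pv_bnd hdom hu)).mp (hmin u hu hinu)
    have h2 : keyLtB (pvKey t) (pvKey u) = false :=
      hlb (pvKey t) (List.mem_map.mpr ⟨t, List.mem_filter.mpr ⟨ht, hint⟩, rfl⟩)
    have hE : pvKey t = pvKey u := pv_keyLt_antisymm h2 h1
    rw [← hE] at hEq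
    simp only [pvKey, pvX, pvY, pvQ, List.cons.injEq, and_true] at hEq
    obtain ⟨e1, e2⟩ := hEq
    simp only [List.getD_eq_getElem?_getD] at e1 e2
    apply hcoordT
    have hlen : 3 ≤ t.length := hshape' t ht hint
    rw [pv_take2 t hlen]
    simp only [List.cons.injEq, and_true]
    simp only [List.getD_eq_getElem?_getD]
    omega
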